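-- pv_equiv track=rewrite | github.com/atoffano/roi_des_roses | test_roi_des_roses.py | calc_pos_arrivee
-- ===== SOURCE A (Python) =====
-- def calc_pos_arrivee(faux_l_roi, faux_c_roi, carte):
--     true_l_roi = faux_l_roi
--     true_c_roi = faux_c_roi
--     dist_parcourue = int(carte[-1]) # Récupère l'ordre de grandeur associé à la carte (i.e 1, 2 ou 3)
--     for i in range(len(carte)-1):  # On calcule les coordonnées d'arrivée du roi en fonction du/des vecteurs (N, E, S, O) associés à la carte
--         if carte[i] == 'N':
--             true_l_roi -= dist_parcourue
--         elif carte[i] == 'E':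
--             true_c_roi += dist_parcourue
--         elif carte[i] == 'S':
--             true_l_roi += dist_parcourue
--         else:
--             true_c_roi -= dist_parcourue
--     return true_l_roi, true_c_roi
-- ===== SOURCE B (Python) =====
-- def calc_pos_arrivee(faux_l_roi, faux_c_roi, carte):
--     dist = int(carte[-1])
--     body = carte[:-1]
--     n = body.count('N')
--     e = body.count('E')
--     s = body.count('S')
--     west = len(body) - n - e - s  # catch-all: any other char moves west
--     return faux_l_roi + dist * (s - n), faux_c_roi + dist * (e - west)
-- ===== Notes on version B (the rewrite author's own statement) =====
-- stated objective: simpler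
-- what changed: Replaces the per-character accumulation loop by tallying direction counts with str.count and returning a closed-form linear combination of the tallies (west as total-minus-others to keep the catch-all).
import Mathlib
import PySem

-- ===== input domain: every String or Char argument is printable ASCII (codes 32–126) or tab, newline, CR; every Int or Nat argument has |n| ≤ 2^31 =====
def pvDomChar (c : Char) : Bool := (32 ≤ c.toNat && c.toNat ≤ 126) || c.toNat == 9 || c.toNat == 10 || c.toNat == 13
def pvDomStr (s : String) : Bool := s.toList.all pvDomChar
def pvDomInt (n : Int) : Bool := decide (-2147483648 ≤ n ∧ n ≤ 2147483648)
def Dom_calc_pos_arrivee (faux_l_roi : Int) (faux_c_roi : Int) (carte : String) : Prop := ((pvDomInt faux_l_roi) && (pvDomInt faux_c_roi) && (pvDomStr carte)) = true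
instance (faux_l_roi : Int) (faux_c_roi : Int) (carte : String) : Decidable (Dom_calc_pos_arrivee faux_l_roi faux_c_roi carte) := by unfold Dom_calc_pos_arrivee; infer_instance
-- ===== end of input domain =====

-- B replaces A's per-character accumulation loop by direction tallies (str.count) combined in a closed form; objective: simpler.

-- ===== PORT A =====
def calc_pos_arrivee (faux_l_roi : Int) (faux_c_roi : Int) (carte : String) : Int × Int :=
  match PySem.Str.pyGet? carte (-1) with          -- carte[-1]; none = IndexError, excluded by Pre_
  | none => (0, 0)
  | some ch =>
    match PySem.Int.ofChars? [ch] with            -- int(carte[-1]); none = ValueError, excluded by Pre_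
    | none => (0, 0)
    | some dist_parcourue =>
      (PySem.List.pyRange 0 ((carte.toList.length : Int) - 1) 1).foldl
        (fun st i =>
          let c := PySem.List.pyGetD carte.toList i ' '   -- carte[i]; i is in range by the loop bound
          if c = 'N' then (st.1 - dist_parcourue, st.2)
          else if c = 'E' then (st.1, st.2 + dist_parcourue)
          else if c = 'S' then (st.1 + dist_parcourue, st.2)
          else (st.1, st.2 - dist_parcourue))
        (faux_l_roi, faux_c_roi)

-- ===== PORT B =====
def calc_pos_arrivee_alt (faux_l_roi : Int) (faux_c_roi : Int) (carte : String) : Int × Int :=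
  match PySem.Str.pyGet? carte (-1) with          -- int(carte[-1]) as in Source B
  | none => (0, 0)
  | some ch =>
    match PySem.Int.ofChars? [ch] with
    | none => (0, 0)
    | some dist =>
      let body := (PySem.Str.slice carte none (some (-1))).toList   -- carte[:-1]
      let n : Int := body.count 'N'
      let e : Int := body.count 'E'
      let s : Int := body.count 'S'
      let west : Int := (body.length : Int) - n - e - s
      (faux_l_roi + dist * (s - n), faux_c_roi + dist * (e - west))

-- ===== PRECONDITION & SPEC =====
-- Pre_ excludes exactly the inputs where A raises: empty carte (IndexError) and a
-- last character that is not a decimal digit (ValueError from int()).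
def Pre_calc_pos_arrivee (faux_l_roi : Int) (faux_c_roi : Int) (carte : String) : Prop :=
  carte.toList.getLast?.any Char.isDigit = true
instance (faux_l_roi : Int) (faux_c_roi : Int) (carte : String) : Decidable (Pre_calc_pos_arrivee faux_l_roi faux_c_roi carte) := by unfold Pre_calc_pos_arrivee; infer_instance

def pvWitness_calc_pos_arrivee : Int × Int × String := (0, 0, "NE2")

def Spec_calc_pos_arrivee (faux_l_roi : Int) (faux_c_roi : Int) (carte : String) (out : Int × Int) : Prop := out = calc_pos_arrivee_alt faux_l_roi faux_c_roi carte
instance (faux_l_roi : Int) (faux_c_roi : Int) (carte : String) (out : Int × Int) : Decidable (Spec_calc_pos_arrivee faux_l_roi faux_c_roi carte out) := by unfold Spec_calc_pos_arrivee; infer_instance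

-- ===== CLAIM (what is proved, stated in full; the proofs are below) =====
def Claim_equal_calc_pos_arrivee : Prop := ∀ (faux_l_roi : Int) (faux_c_roi : Int) (carte : String), Dom_calc_pos_arrivee faux_l_roi faux_c_roi carte → Pre_calc_pos_arrivee faux_l_roi faux_c_roi carte → Spec_calc_pos_arrivee faux_l_roi faux_c_roi carte (calc_pos_arrivee faux_l_roi faux_c_roi carte)

-- ===== LEMMAS AND PROOFS =====

/-- A's loop body as a standalone step function. -/
def pvStepA (d : Int) (st : Int × Int) (c : Char) : Int × Int :=
  if c = 'N' then (st.1 - d, st.2)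
  else if c = 'E' then (st.1, st.2 + d)
  else if c = 'S' then (st.1 + d, st.2)
  else (st.1, st.2 - d)

/-- Closed form of A's accumulation loop: the tallies of B. -/
lemma pvLoopA_closed (d : Int) (body : List Char) : ∀ (l c : Int),
    body.foldl (pvStepA d) (l, c) =
      (l + d * ((body.count 'S' : Int) - (body.count 'N' : Int)),
       c + d * ((body.count 'E' : Int) -
         ((body.length : Int) - (body.count 'N' : Int) - (body.count 'E' : Int) - (body.count 'S' : Int)))) := by
  induction body with
  | nil => intro l c; simp
  | cons ch rest ih =>
    intro l c
    rw [List.foldl_cons]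
    have hc : ∀ a b : Int, pvStepA d (a, b) ch = if ch = 'N' then (a - d, b)
        else if ch = 'E' then (a, b + d) else if ch = 'S' then (a + d, b) else (a, b - d) :=
      fun _ _ => rfl
    rw [hc]
    split_ifs with h1 h2 h3
    · subst h1; rw [ih]
      simp only [List.count_cons_self, List.count_cons_of_ne (by decide : ('N':Char) ≠ 'S'),
        List.count_cons_of_ne (by decide : ('N':Char) ≠ 'E'), List.length_cons, Prod.mk.injEq]
      push_cast
      exact ⟨by ring, by ring⟩
    · subst h2; rw [ih]
      simp only [List.count_cons_self, List.count_cons_of_ne (by decide : ('E':Char) ≠ 'S'),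
        List.count_cons_of_ne (by decide : ('E':Char) ≠ 'N'), List.length_cons, Prod.mk.injEq]
      push_cast
      exact ⟨trivial, by ring⟩
    · subst h3; rw [ih]
      simp only [List.count_cons_self, List.count_cons_of_ne (by decide : ('S':Char) ≠ 'N'),
        List.count_cons_of_ne (by decide : ('S':Char) ≠ 'E'), List.length_cons, Prod.mk.injEq]
      push_cast
      exact ⟨by ring, by ring⟩
    · rw [ih]
      simp only [List.count_cons_of_ne h1, List.count_cons_of_ne h2,
        List.count_cons_of_ne h3, List.length_cons, Prod.mk.injEq]
      push_cast
      exact ⟨trivial, by ring⟩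

theorem calc_pos_arrivee_spec : Claim_equal_calc_pos_arrivee := by
  intro fl fc carte _hDom hPre
  unfold Pre_calc_pos_arrivee at hPre
  unfold Spec_calc_pos_arrivee calc_pos_arrivee calc_pos_arrivee_alt
  rcases hLast : carte.toList.getLast? with _ | ch
  · rw [hLast] at hPre; simp at hPre
  · have hne : carte.toList ≠ [] := by
      intro h; rw [h] at hLast; simp at hLast
    have hget : PySem.Str.pyGet? carte (-1) = some ch := by
      simp [PySem.Str.pyGet?, PySem.List.pyGet?_neg_one, hLast]
    rw [hget]
    rcases hOf : PySem.Int.ofChars? [ch] with _ | d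
    · simp only [hOf]
    · simp only [hOf]
      -- rewrite the loop bound and index list to carte.toList.dropLast
      have hlen : 1 ≤ carte.toList.length := by
        cases h : carte.toList with
        | nil => exact absurd h hne
        | cons a t => simp
      have hbound : ((carte.toList.length : Int) - 1) = ((carte.toList.dropLast.length : Nat) : Int) := by
        rw [List.length_dropLast]; omega
      have hcongr :
          (PySem.List.pyRange 0 ((carte.toList.length : Int) - 1) 1).foldl
            (fun st i => pvStepA d st (PySem.List.pyGetD carte.toList i ' ')) (fl, fc)
          = carte.toList.dropLast.foldl (pvStepA d) (fl, fc) := by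
        rw [hbound]
        rw [PySem.List.foldl_congr_mem _ _
          (fun st i => pvStepA d st (PySem.List.pyGetD carte.toList.dropLast i ' ')) _ ?_]
        · exact PySem.List.foldl_pyRange_zero_pyGetD' carte.toList.dropLast ' ' (pvStepA d) (fl, fc)
        · intro acc i hi
          rw [PySem.List.mem_pyRange_one] at hi
          have hi2 : i < (carte.toList.dropLast.length : Int) := hi.2
          have hi3 : i < ((carte.toList.length : Int)) := by
            rw [List.length_dropLast] at hi2; omega
          beta_reduce
          rw [PySem.List.pyGetD_eq_getElem _ _ hi.1 hi2,
            PySem.List.pyGetD_eq_getElem _ _ hi.1 hi3]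
          rw [List.getElem_dropLast]
      simp only [pvStepA] at hcongr
      rw [hcongr]
      have hbodyB : (PySem.Str.slice carte none (some (-1))).toList = carte.toList.dropLast :=
        PySem.Str.slice_to_neg_one carte
      simp only [hbodyB]
      exact pvLoopA_closed d carte.toList.dropLast fl fc

-- ===== VERDICT (by name: the statement is the Claim_ definition above) =====
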